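-- pv_equiv track=rewrite | github.com/eburi/hass_signalk_bridge | custom_components/signalk_bridge/unit_mapping.py | path_to_friendly_name
-- ===== SOURCE A (Python) =====
-- def path_to_friendly_name(path: str) -> str:
--     """Convert a SignalK path to a human-friendly sensor name.
--
--     e.g. 'navigation.speedOverGround' -> 'Speed Over Ground'
--          'environment.wind.speedApparent' -> 'Wind Speed Apparent'
--          'propulsion.port.revolutions' -> 'Port Revolutions'
--     """
--     parts = path.split(".")
--
--     # Remove common prefixes that are redundant
--     if parts and parts[0] in (
--         "navigation",
--         "environment",
--         "electrical",
--         "propulsion",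
--         "tanks",
--         "notifications",
--         "steering",
--         "communication",
--         "design",
--         "sails",
--         "performance",
--     ):
--         parts = parts[1:]
--
--     # Convert camelCase to words
--     result_parts = []
--     for part in parts:
--         words = []
--         current_word = []
--         for char in part:
--             if char.isupper() and current_word:
--                 words.append("".join(current_word))
--                 current_word = [char]
--             else:
--                 current_word.append(char)
--         if current_word:
--             words.append("".join(current_word))
--         result_parts.append(" ".join(w.capitalize() for w in words))
--
--     return " ".join(result_parts)
-- ===== SOURCE B (Python) =====
-- def path_to_friendly_name(path: str) -> str:
--     """Convert a SignalK path to a human-friendly sensor name.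
--
--     Builds each segment's word list back-to-front: walking the characters in
--     reverse, a character either starts a new word (when the word so far begins
--     with an uppercase letter, i.e. a camelCase boundary) or is prepended to it.
--     """
--     parts = path.split(".")
--
--     if parts and parts[0] in (
--         "navigation",
--         "environment",
--         "electrical",
--         "propulsion",
--         "tanks",
--         "notifications",
--         "steering",
--         "communication",
--         "design",
--         "sails",
--         "performance",
--     ):
--         parts = parts[1:]
--
--     friendly = []
--     for part in parts:
--         words = []
--         for ch in reversed(part):
--             if words and not words[0][:1].isupper():
--                 words[0] = ch + words[0]
--             else:
--                 words.insert(0, ch)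
--         friendly.append(" ".join(w.capitalize() for w in words))
--
--     return " ".join(friendly)
-- ===== Notes on version B (the rewrite author's own statement) =====
-- stated objective: alternative
-- what changed: Each dotted segment's word list is built back-to-front: a single reverse scan either prepends the character to the first word or starts a new word depending on whether that word begins uppercase, replacing A's forward accumulator with a flushed current_word buffer.
import Mathlib
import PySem

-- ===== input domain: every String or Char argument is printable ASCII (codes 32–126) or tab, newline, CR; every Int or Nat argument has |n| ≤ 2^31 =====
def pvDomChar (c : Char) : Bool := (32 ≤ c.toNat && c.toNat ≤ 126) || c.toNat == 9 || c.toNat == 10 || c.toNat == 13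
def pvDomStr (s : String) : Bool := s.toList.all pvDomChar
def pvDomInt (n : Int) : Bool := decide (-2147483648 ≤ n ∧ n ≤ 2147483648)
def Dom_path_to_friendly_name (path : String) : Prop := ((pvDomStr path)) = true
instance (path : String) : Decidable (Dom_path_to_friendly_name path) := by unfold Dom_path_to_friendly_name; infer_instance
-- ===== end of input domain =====

-- B rebuilds each segment's word list back-to-front (reverse scan, prepend-or-new-word)
-- instead of A's forward accumulator with a flushed current_word; objective: alternative.

-- shared primitive: Python str.capitalize() — first char uppercased, rest lowered (exact on ASCII)
def pvCapitalize (w : List Char) : List Char :=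
  match w with
  | [] => []
  | c :: cs => PySem.Chars.upperChar c :: PySem.Chars.lower cs

-- the tuple of dropped prefixes, shared verbatim by both Pythons
def pvPrefixes : List (List Char) :=
  ["navigation", "environment", "electrical", "propulsion", "tanks", "notifications",
   "steering", "communication", "design", "sails", "performance"].map String.toList

-- shared: 'if parts and parts[0] in (…): parts = parts[1:]' (both Pythons have this code verbatim)
def pvDropPrefix (parts : List (List Char)) : List (List Char) :=
  match parts with
  | [] => parts
  | p :: rest => if p ∈ pvPrefixes then rest else p :: rest

-- ===== PORT A =====
-- inner loop over one segment: state (words, current_word); current_word grows by append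
def pvAStep (p : List (List Char) × List Char) (c : Char) : List (List Char) × List Char :=
  if PySem.Chars.isupper c && !p.2.isEmpty then (p.1 ++ [p.2], [c]) else (p.1, p.2 ++ [c])

def pvAInner (part : List Char) : List Char :=
  let st := part.foldl pvAStep ([], [])
  let words := if st.2.isEmpty then st.1 else st.1 ++ [st.2]
  PySem.Chars.join [' '] (words.map pvCapitalize)

def path_to_friendly_name (path : String) : String :=
  let parts := pvDropPrefix (PySem.Chars.splitOn path.toList ['.'])
  String.ofList (PySem.Chars.join [' '] (parts.map pvAInner))

-- ===== PORT B =====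
-- 'words[0][:1].isupper()': an empty slice is not uppercase, a one-char slice tests that char (exact)
def pvHeadUpper (w : List Char) : Bool :=
  match w with
  | [] => false
  | d :: _ => PySem.Chars.isupper d

-- one step of B's reverse scan: start a new word or prepend to the first word
def pvBStep (words : List (List Char)) (c : Char) : List (List Char) :=
  match words with
  | [] => [[c]]
  | w :: ws => if !pvHeadUpper w then (c :: w) :: ws else [c] :: w :: ws

def pvBInner (part : List Char) : List Char :=
  let words := part.reverse.foldl pvBStep []
  PySem.Chars.join [' '] (words.map pvCapitalize)

def path_to_friendly_name_alt (path : String) : String :=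
  let parts := pvDropPrefix (PySem.Chars.splitOn path.toList ['.'])
  String.ofList (PySem.Chars.join [' '] (parts.map pvBInner))

-- ===== PRECONDITION & SPEC =====
def Spec_path_to_friendly_name (path : String) (out : String) : Prop := out = path_to_friendly_name_alt path
instance (path : String) (out : String) : Decidable (Spec_path_to_friendly_name path out) := by unfold Spec_path_to_friendly_name; infer_instance

-- ===== CLAIM (what is proved, stated in full; the proofs are below) =====
def Claim_equal_path_to_friendly_name : Prop := ∀ (path : String), Dom_path_to_friendly_name path → Spec_path_to_friendly_name path (path_to_friendly_name path)

-- ===== LEMMAS AND PROOFS =====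

-- merging a (nonempty) pending word into B's word list for the remaining suffix
def pvMergeL (cur : List Char) (r : List (List Char)) : List (List Char) :=
  match r with
  | [] => [cur]
  | w :: ws => if !pvHeadUpper w then (cur ++ w) :: ws else cur :: w :: ws

theorem pvBStep_eq_mergeL (c : Char) (r : List (List Char)) :
    pvBStep r c = pvMergeL [c] r := by
  cases r with
  | nil => rfl
  | cons w ws => simp [pvBStep, pvMergeL]

theorem pvBWords_cons (c : Char) (cs : List Char) :
    (c :: cs).reverse.foldl pvBStep [] = pvBStep (cs.reverse.foldl pvBStep []) c := by
  simp [List.foldl_append]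

theorem pvHeadUpper_cons (d : Char) (w : List Char) :
    pvHeadUpper (d :: w) = PySem.Chars.isupper d := rfl

theorem pvMergeL_upper (c : Char) (cur : List Char) (r : List (List Char))
    (hc : PySem.Chars.isupper c = true) :
    cur :: pvMergeL [c] r = pvMergeL cur (pvBStep r c) := by
  cases r with
  | nil => simp [pvMergeL, pvBStep, pvHeadUpper_cons, hc]
  | cons w ws =>
    cases hw : pvHeadUpper w <;>
      simp [pvMergeL, pvBStep, pvHeadUpper_cons, hc, hw]

theorem pvMergeL_lower (c : Char) (cur : List Char) (r : List (List Char))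
    (hc : PySem.Chars.isupper c = false) :
    pvMergeL (cur ++ [c]) r = pvMergeL cur (pvBStep r c) := by
  cases r with
  | nil => simp [pvMergeL, pvBStep, pvHeadUpper_cons, hc]
  | cons w ws =>
    cases hw : pvHeadUpper w <;>
      simp [pvMergeL, pvBStep, pvHeadUpper_cons, hc, hw]

-- the loop invariant: A's forward fold with pending word cur ≠ [] produces
-- the already-flushed words followed by cur merged into B's chunking of the suffix
theorem pvLoop (cs : List Char) :
    ∀ (words : List (List Char)) (cur : List Char), cur ≠ [] →
      (let st := cs.foldl pvAStep (words, cur)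
       if st.2.isEmpty then st.1 else st.1 ++ [st.2]) =
      words ++ pvMergeL cur (cs.reverse.foldl pvBStep []) := by
  induction cs with
  | nil =>
    intro words cur hcur
    simp [pvMergeL, List.isEmpty_iff, hcur]
  | cons c rest ih =>
    intro words cur hcur
    have hrec : (c :: rest).reverse.foldl pvBStep [] =
        pvBStep (rest.reverse.foldl pvBStep []) c := pvBWords_cons c rest
    cases hc : PySem.Chars.isupper c with
    | true =>
      have hstep : pvAStep (words, cur) c = (words ++ [cur], [c]) := by
        simp [pvAStep, hc, hcur]
      simp only [List.foldl_cons, hstep, hrec]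
      rw [ih (words ++ [cur]) [c] (by simp)]
      rw [← pvMergeL_upper c cur _ hc]
      simp
    | false =>
      have hstep : pvAStep (words, cur) c = (words, cur ++ [c]) := by
        simp [pvAStep, hc]
      simp only [List.foldl_cons, hstep, hrec]
      rw [ih words (cur ++ [c]) (by simp)]
      rw [← pvMergeL_lower c cur _ hc]

theorem pvInner_eq (part : List Char) : pvAInner part = pvBInner part := by
  unfold pvAInner pvBInner
  cases part with
  | nil => rfl
  | cons c cs =>
    have h0 : pvAStep ([], []) c = ([], [c]) := by simp [pvAStep]
    simp only [List.foldl_cons, h0]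
    rw [pvLoop cs [] [c] (by simp), pvBWords_cons c cs, pvBStep_eq_mergeL]
    simp

-- ===== VERDICT (by name: the statement is the Claim_ definition above) =====
theorem path_to_friendly_name_spec : Claim_equal_path_to_friendly_name := by
  intro path _
  unfold Spec_path_to_friendly_name path_to_friendly_name path_to_friendly_name_alt
  rw [funext pvInner_eq]
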